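-- pv_equiv track=rewrite | github.com/daaidouya/ocr-tf2 | dataset.py | map_to_chars
-- ===== SOURCE A (Python) =====
-- def map_to_chars(inputs, table, blank_index=0, merge_repeated=False):
--     """Map to chars.
--
--     Args:
--         inputs: list of char ids.
--         table: char map.
--         blank_index: the index of blank.
--         merge_repeated: True, Only if tf decoder is not used.
--     Returns:
--         lines: list of string.
--     """
--     lines = []
--     for line in inputs:
--         text = ""
--         previous_char = -1
--         for char_index in line:
--             if merge_repeated:
--                 if char_index == previous_char:
--                     continue
--             previous_char = char_index
--             if char_index == blank_index:
--                 continue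
--             text += table[char_index]
--         lines.append(text)
--     return lines
-- ===== SOURCE B (Python) =====
-- def _collapse(line):
--     out = []
--     for c in line:
--         if not out or c != out[-1]:
--             out.append(c)
--     return out
--
--
-- def map_to_chars(inputs, table, blank_index=0, merge_repeated=False):
--     lines = []
--     for line in inputs:
--         seq = _collapse(line) if merge_repeated else line
--         lines.append("".join(table[c] for c in seq if c != blank_index))
--     return lines
-- ===== Notes on version B (the rewrite author's own statement) =====
-- stated objective: idiomatic
-- what changed: Replaces A's single interleaved pass with a previous_char=-1 sentinel by a two-phase decomposition: collapse adjacent repeats first, then filter out blanks and join the table lookups.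
-- outside the precondition, e.g. on map_to_chars([[-1]], ['x'], 0, True): A returns [''], B returns ['x']
import Mathlib
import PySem

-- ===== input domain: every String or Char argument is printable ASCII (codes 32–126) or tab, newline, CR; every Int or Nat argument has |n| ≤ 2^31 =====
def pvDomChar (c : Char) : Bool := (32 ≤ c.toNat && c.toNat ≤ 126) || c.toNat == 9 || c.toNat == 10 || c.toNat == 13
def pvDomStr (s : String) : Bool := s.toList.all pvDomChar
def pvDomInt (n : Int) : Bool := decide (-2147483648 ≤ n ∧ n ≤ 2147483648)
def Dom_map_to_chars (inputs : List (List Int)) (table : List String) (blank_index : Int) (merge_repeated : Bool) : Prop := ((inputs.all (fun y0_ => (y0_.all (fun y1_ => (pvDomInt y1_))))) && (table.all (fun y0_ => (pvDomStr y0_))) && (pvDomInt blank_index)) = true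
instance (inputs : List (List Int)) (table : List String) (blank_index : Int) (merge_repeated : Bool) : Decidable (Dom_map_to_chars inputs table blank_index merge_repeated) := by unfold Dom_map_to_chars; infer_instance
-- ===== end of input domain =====

-- B replaces A's interleaved sentinel loop by a two-phase collapse-then-filter-and-join decomposition (same cost);
-- return-value equivalence on Pre_ (valid char ids; no sentinel-colliding leading -1 under merge_repeated).


-- ===== PORT A =====
-- table[char_index] raises IndexError out of range (negative indices wrap): ported with pyGet?;
-- the .getD "" arm is unreachable for the lookups A performs on inputs admitted by Pre_.
def map_to_chars (inputs : List (List Int)) (table : List String) (blank_index : Int) (merge_repeated : Bool) : List String :=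
  inputs.foldl (fun lines line =>
    let st := line.foldl (fun (st : String × Int) char_index =>
      if merge_repeated && char_index == st.2 then st
      else
        if char_index == blank_index then (st.1, char_index)
        else (st.1 ++ (PySem.List.pyGet? table char_index).getD "", char_index)) ("", -1)
    lines ++ [st.1]) []

-- ===== PORT B =====
-- B's _collapse: accumulate, appending c unless it equals the last kept element.
def pvCollapse (line : List Int) : List Int :=
  line.foldl (fun out c => if out = [] ∨ out.getLast? ≠ some c then out ++ [c] else out) []

def map_to_chars_alt (inputs : List (List Int)) (table : List String) (blank_index : Int) (merge_repeated : Bool) : List String :=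
  inputs.map (fun line =>
    let seq := if merge_repeated then pvCollapse line else line
    PySem.Str.join "" ((seq.filter (fun c => c != blank_index)).map
      (fun c => (PySem.List.pyGet? table c).getD "")))

-- ===== PRECONDITION & SPEC =====
-- Pre_ excludes (i) the inputs on which Python A raises IndexError on table[c] (a looked-up char id out
-- of range both ways), and (ii) under merge_repeated, lines starting with char id -1: there A's
-- previous_char=-1 sentinel accidentally merges the leading -1 run away without ever looking it up, a
-- corner outside the intended domain (char ids are nonnegative table indices) on which neither
-- behaviour is specified; B decodes that -1 like any other id (cite in claim.json).
def Pre_map_to_chars (inputs : List (List Int)) (table : List String) (blank_index : Int) (merge_repeated : Bool) : Prop :=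
  (∀ line ∈ inputs, ∀ c ∈ line, c = blank_index ∨ (-(table.length : Int) ≤ c ∧ c < table.length)) ∧
  (merge_repeated = true → ∀ line ∈ inputs, line.head? ≠ some (-1))
instance (inputs : List (List Int)) (table : List String) (blank_index : Int) (merge_repeated : Bool) : Decidable (Pre_map_to_chars inputs table blank_index merge_repeated) := by unfold Pre_map_to_chars; infer_instance
def pvWitness_map_to_chars : List (List Int) × List String × Int × Bool := ([[1, 2, 2, 0]], ["-", "a", "b"], 0, true)

def Spec_map_to_chars (inputs : List (List Int)) (table : List String) (blank_index : Int) (merge_repeated : Bool) (out : List String) : Prop := out = map_to_chars_alt inputs table blank_index merge_repeated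
instance (inputs : List (List Int)) (table : List String) (blank_index : Int) (merge_repeated : Bool) (out : List String) : Decidable (Spec_map_to_chars inputs table blank_index merge_repeated out) := by unfold Spec_map_to_chars; infer_instance

-- ===== CLAIM =====
def Claim_equal_map_to_chars : Prop := ∀ (inputs : List (List Int)) (table : List String) (blank_index : Int) (merge_repeated : Bool), Dom_map_to_chars inputs table blank_index merge_repeated → Pre_map_to_chars inputs table blank_index merge_repeated → Spec_map_to_chars inputs table blank_index merge_repeated (map_to_chars inputs table blank_index merge_repeated)

-- ===== LEMMAS AND PROOFS =====

def gcollapse : Int → List Int → List Int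
  | _, [] => []
  | p, c :: cs => if c = p then gcollapse p cs else c :: gcollapse c cs
def pvJ (table : List String) (blank : Int) (ls : List Int) : String :=
  PySem.Str.join "" ((ls.filter (fun c => c != blank)).map (fun c => (PySem.List.pyGet? table c).getD ""))

theorem strjoin_empty_cons (s : String) (l : List String) :
    PySem.Str.join "" (s :: l) = s ++ PySem.Str.join "" l := by
  apply String.toList_inj.mp
  simp only [PySem.Str.join, PySem.Chars.join, String.toList_ofList, String.toList_append]
  cases l <;> simp [List.intercalate]
theorem pvJ_nil (table : List String) (blank : Int) : pvJ table blank [] = "" := rfl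
theorem pvJ_cons (table : List String) (blank c : Int) (ls : List Int) :
    pvJ table blank (c :: ls) =
      (if c = blank then "" else (PySem.List.pyGet? table c).getD "") ++ pvJ table blank ls := by
  by_cases h : c = blank <;> simp [pvJ, h, strjoin_empty_cons, String.empty_append]

theorem foldA_merge (table : List String) (blank : Int) (l : List Int) :
    ∀ (text : String) (prev : Int),
      (l.foldl (fun (st : String × Int) c =>
        if c = st.2 then st
        else if c = blank then (st.1, c)
        else (st.1 ++ (PySem.List.pyGet? table c).getD "", c)) (text, prev)).1
      = text ++ pvJ table blank (gcollapse prev l) := by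
  induction l with
  | nil =>
    intro text prev
    simp [gcollapse, pvJ_nil, String.append_empty]
  | cons c cs ih =>
    intro text prev
    by_cases hc : c = prev
    · simp [List.foldl_cons, hc, gcollapse, ih]
    · by_cases hb : c = blank
      · subst hb
        simp [List.foldl_cons, hc, gcollapse, ih, pvJ_cons, String.empty_append]
      · simp [List.foldl_cons, hc, hb, gcollapse, ih, pvJ_cons, String.append_assoc]

theorem foldA_nomerge (table : List String) (blank : Int) (l : List Int) :
    ∀ (text : String) (prev : Int),
      (l.foldl (fun (st : String × Int) c =>
        if c = blank then (st.1, c)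
        else (st.1 ++ (PySem.List.pyGet? table c).getD "", c)) (text, prev)).1
      = text ++ pvJ table blank l := by
  induction l with
  | nil => intro text prev; simp [pvJ_nil, String.append_empty]
  | cons c cs ih =>
    intro text prev
    by_cases hb : c = blank <;>
      simp [List.foldl_cons, hb, ih, pvJ_cons, String.empty_append, String.append_assoc]

theorem portA_eq_map (inputs : List (List Int)) (table : List String) (blank : Int) (merge : Bool) :
    map_to_chars inputs table blank merge
    = inputs.map (fun l => if merge then pvJ table blank (gcollapse (-1) l) else pvJ table blank l) := by
  unfold map_to_chars
  simp only [PySem.List.foldl_append_singleton_eq_map, List.nil_append]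
  apply List.map_congr_left
  intro l _
  cases merge
  · simp only [Bool.false_and, Bool.false_eq_true, if_false]
    have hstep : (fun (st : String × Int) c =>
        if c == blank then (st.1, c)
        else (st.1 ++ (PySem.List.pyGet? table c).getD "", c))
      = (fun (st : String × Int) c =>
        if c = blank then (st.1, c)
        else (st.1 ++ (PySem.List.pyGet? table c).getD "", c)) := by
      funext st c; by_cases h : c = blank <;> simp [h]
    rw [hstep, foldA_nomerge table blank l "" (-1), String.empty_append]
  · simp only [Bool.true_and]
    have hstep : (fun (st : String × Int) c =>
        if c == st.2 then st
        else if c == blank then (st.1, c)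
        else (st.1 ++ (PySem.List.pyGet? table c).getD "", c))
      = (fun (st : String × Int) c =>
        if c = st.2 then st
        else if c = blank then (st.1, c)
        else (st.1 ++ (PySem.List.pyGet? table c).getD "", c)) := by
      funext st c
      by_cases h1 : c = st.2 <;> by_cases h2 : c = blank <;> simp [h1, h2]
    rw [hstep, foldA_merge table blank l "" (-1), String.empty_append]
    simp

theorem portB_eq_map (inputs : List (List Int)) (table : List String) (blank : Int) (merge : Bool) :
    map_to_chars_alt inputs table blank merge
    = inputs.map (fun l => pvJ table blank (if merge then pvCollapse l else l)) := by
  unfold map_to_chars_alt pvJ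
  apply List.map_congr_left
  intro l _
  cases merge <;> rfl

theorem pvCollapse_inv (l : List Int) :
    ∀ (acc : List Int) (p : Int), acc.getLast? = some p →
      l.foldl (fun out c => if out = [] ∨ out.getLast? ≠ some c then out ++ [c] else out) acc
      = acc ++ gcollapse p l := by
  induction l with
  | nil => intro acc p _; simp [gcollapse]
  | cons c cs ih =>
    intro acc p hlast
    have hne : acc ≠ [] := by intro h; simp [h] at hlast
    by_cases hc : c = p
    · have : ¬(acc = [] ∨ acc.getLast? ≠ some c) := by simp [hne, hlast, hc]
      simp only [List.foldl_cons, if_neg this]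
      simp [ih acc p hlast, gcollapse, hc]
    · have : (acc = [] ∨ acc.getLast? ≠ some c) := by
        right; rw [hlast]; simp; omega
      simp only [List.foldl_cons, if_pos this]
      rw [ih (acc ++ [c]) c (by simp)]
      simp [gcollapse, hc]

theorem pvCollapse_eq (l : List Int) :
    pvCollapse l = match l with | [] => [] | c :: cs => c :: gcollapse c cs := by
  cases l with
  | nil => rfl
  | cons c cs =>
    unfold pvCollapse
    simp only [List.foldl_cons, true_or, if_true, List.nil_append]
    rw [pvCollapse_inv cs [c] c (by simp)]
    rfl

theorem line_eq (table : List String) (blank : Int) (l : List Int)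
    (h : l.head? ≠ some (-1)) :
    pvJ table blank (gcollapse (-1) l) = pvJ table blank (pvCollapse l) := by
  cases l with
  | nil => rfl
  | cons c cs =>
    rw [pvCollapse_eq]
    have h1 : c ≠ -1 := by intro hc; exact h (by simp [hc])
    simp [gcollapse, h1]

-- ===== VERDICT =====
theorem map_to_chars_spec : Claim_equal_map_to_chars := by
  intro inputs table blank merge _ hpre
  rw [Spec_map_to_chars, portA_eq_map, portB_eq_map]
  apply List.map_congr_left
  intro l hl
  cases merge
  · simp
  · simpa using line_eq table blank l (hpre.2 rfl l hl)
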